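-- pv_equiv track=rewrite | github.com/GianRathgeb/CodingChallanges | hard/First_Before_Second_Letter/main.py | first_before_second
-- ===== SOURCE A (Python) =====
-- def first_before_second(s, first, second):
-- 	after = False
-- 	for l in s:
-- 		if after == True:
-- 			if l == first: return False
-- 		if l == second:
-- 			after = True
-- 	return True
-- ===== SOURCE B (Python) =====
-- def first_before_second(s, first, second):
--     i = next((k for k, l in enumerate(s) if l == second), -1)
--     j = next((k for k in range(len(s) - 1, -1, -1) if s[k] == first), -1)
--     return not (i != -1 and j > i)
-- ===== Notes on version B (the rewrite author's own statement) =====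
-- stated objective: alternative
-- what changed: Replaces A's running boolean flag with two independent index scans (first position of `second` scanning forward, last position of `first` scanning backward) combined by one positional comparison.
import Mathlib
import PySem

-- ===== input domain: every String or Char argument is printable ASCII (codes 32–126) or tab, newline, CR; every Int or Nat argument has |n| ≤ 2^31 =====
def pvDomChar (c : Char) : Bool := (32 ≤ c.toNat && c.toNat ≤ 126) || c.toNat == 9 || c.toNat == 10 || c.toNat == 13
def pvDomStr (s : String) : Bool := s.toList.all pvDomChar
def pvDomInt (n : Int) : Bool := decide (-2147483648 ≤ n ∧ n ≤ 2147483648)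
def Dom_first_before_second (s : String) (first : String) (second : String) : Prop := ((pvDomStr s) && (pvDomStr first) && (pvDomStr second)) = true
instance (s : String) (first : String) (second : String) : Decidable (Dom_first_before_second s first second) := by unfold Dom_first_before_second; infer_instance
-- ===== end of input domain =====

-- B replaces A's running boolean flag by two index scans (first index of `second`
-- forward, last index of `first` backward) and one positional comparison; objective: alternative.

-- ===== PORT A =====
-- A's loop: `after` flag, return False on a `first` char seen while after==True.
def fbsLoop (first : String) (second : String) : List Char → Bool → Bool
  | [], _ => true
  | c :: rest, after =>
    if after && (String.mk [c] == first) then false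
    else fbsLoop first second rest (after || (String.mk [c] == second))

def first_before_second (s : String) (first : String) (second : String) : Bool :=
  fbsLoop first second s.toList false

-- ===== PORT B =====
-- forward scan with running index k: first position whose char equals `second`, -1 if none
def fbsFirstIdx (second : String) : List Char → Int → Int
  | [], _ => -1
  | c :: rest, k => if String.mk [c] == second then k else fbsFirstIdx second rest (k + 1)

-- backward scan (the range(len-1,-1,-1) loop): fed the REVERSED list with k = len-1,
-- so it visits exactly s[len-1], s[len-2], …, s[0]
def fbsLastIdx (first : String) : List Char → Int → Int
  | [], _ => -1
  | c :: rest, k => if String.mk [c] == first then k else fbsLastIdx first rest (k - 1)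

def first_before_second_alt (s : String) (first : String) (second : String) : Bool :=
  let cs := s.toList
  let i := fbsFirstIdx second cs 0
  let j := fbsLastIdx first cs.reverse ((cs.length : Int) - 1)
  !(i != -1 && decide (j > i))

-- ===== PRECONDITION & SPEC =====
def Spec_first_before_second (s : String) (first : String) (second : String) (out : Bool) : Prop := out = first_before_second_alt s first second
instance (s : String) (first : String) (second : String) (out : Bool) : Decidable (Spec_first_before_second s first second out) := by unfold Spec_first_before_second; infer_instance

-- ===== CLAIM (what is proved, stated in full; the proofs are below) =====
def Claim_equal_first_before_second : Prop := ∀ (s : String) (first : String) (second : String), Dom_first_before_second s first second → Spec_first_before_second s first second (first_before_second s first second)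

-- ===== LEMMAS AND PROOFS =====

-- once `after` is true, A's loop returns false iff some remaining char equals `first`
theorem fbsLoop_true (f sec : String) (cs : List Char) :
    fbsLoop f sec cs true = !cs.any (fun c => String.mk [c] == f) := by
  induction cs with
  | nil => simp [fbsLoop]
  | cons c rest ih =>
    by_cases h : (String.mk [c] == f) = true <;> simp [fbsLoop, h, ih]

theorem fbsFirstIdx_lb (sec : String) (cs : List Char) (k : Int) :
    fbsFirstIdx sec cs k = -1 ∨ k ≤ fbsFirstIdx sec cs k := by
  induction cs generalizing k with
  | nil => left; rfl
  | cons c rest ih =>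
    by_cases h : (String.mk [c] == sec) = true
    · right; simp [fbsFirstIdx, h]
    · rcases ih (k + 1) with h1 | h1 <;> simp [fbsFirstIdx, h] <;> omega

theorem fbsLastIdx_append (f : String) (xs ys : List Char) (k : Int) :
    fbsLastIdx f (xs ++ ys) k =
      if xs.any (fun c => String.mk [c] == f) then fbsLastIdx f xs k
      else fbsLastIdx f ys (k - xs.length) := by
  induction xs generalizing k with
  | nil => simp
  | cons c rest ih =>
    by_cases h : (String.mk [c] == f) = true
    · simp [fbsLastIdx, h]
    · rw [List.cons_append,
        show fbsLastIdx f (c :: (rest ++ ys)) k = fbsLastIdx f (rest ++ ys) (k - 1) from by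
          simp [fbsLastIdx, h], ih]
      simp only [List.any_cons, h, Bool.false_or, List.length_cons]
      rw [show fbsLastIdx f (c :: rest) k = fbsLastIdx f rest (k - 1) from by
        simp [fbsLastIdx, h]]
      split_ifs
      · rfl
      · congr 1; push_cast; ring

theorem fbsLastIdx_neg (f : String) (cs : List Char) (k : Int)
    (h : cs.any (fun c => String.mk [c] == f) = false) : fbsLastIdx f cs k = -1 := by
  induction cs generalizing k with
  | nil => rfl
  | cons c rest ih =>
    simp only [List.any_cons, Bool.or_eq_false_iff] at h
    simp [fbsLastIdx, h.1, ih _ h.2]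

theorem fbsLastIdx_bnd (f : String) (cs : List Char) (k : Int)
    (h : cs.any (fun c => String.mk [c] == f) = true) :
    k - cs.length + 1 ≤ fbsLastIdx f cs k ∧ fbsLastIdx f cs k ≤ k := by
  induction cs generalizing k with
  | nil => simp at h
  | cons c rest ih =>
    by_cases hc : (String.mk [c] == f) = true
    · simp only [fbsLastIdx, hc, if_true, List.length_cons]
      constructor <;> [push_cast; skip] <;> omega
    · simp only [List.any_cons, hc, Bool.false_or] at h
      have := ih (k - 1) h
      simp only [fbsLastIdx, hc, if_false, List.length_cons]
      constructor <;> [push_cast; skip] <;> omega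

-- main invariant: A's loop (after=false) equals B's positional comparison started at offset k
theorem fbs_main (f sec : String) (cs : List Char) (k : Int) (hk : 0 ≤ k) :
    fbsLoop f sec cs false =
      !(fbsFirstIdx sec cs k != -1 &&
        decide (fbsLastIdx f cs.reverse (k + cs.length - 1) > fbsFirstIdx sec cs k)) := by
  induction cs generalizing k with
  | nil => simp [fbsLoop, fbsFirstIdx, fbsLastIdx]
  | cons c rest ih =>
    have hrev : rest.reverse.any (fun d => String.mk [d] == f) =
        rest.any (fun d => String.mk [d] == f) := List.any_reverse ..
    have happ := fbsLastIdx_append f rest.reverse [c] (k + (c :: rest).length - 1)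
    by_cases hc : (String.mk [c] == sec) = true
    · -- head is `second`: i = k; A's loop continues with after=true
      simp only [fbsLoop, Bool.false_and, if_false, hc, Bool.or_true, fbsLoop_true,
        fbsFirstIdx, if_true, List.reverse_cons, happ, hrev]
      by_cases hF : rest.any (fun d => String.mk [d] == f) = true
      · have hb := fbsLastIdx_bnd f rest.reverse (k + (c :: rest).length - 1) (by simp [hrev, hF])
        simp only [List.length_reverse, List.length_cons] at hb
        push_cast at hb
        simp [hF, show k ≠ -1 by omega]
        push_cast
        omega
      · simp only [hF, fbsLastIdx]
        rw [Bool.not_eq_true] at hF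
        by_cases hcf : (String.mk [c] == f) = true
        · simp [hcf, hF, show k ≠ -1 by omega]
          push_cast
          omega
        · simp [hcf, hF, show ¬ ((-1 : Int) > k) by omega, show k ≠ -1 by omega]
    · -- head is not `second`: i comes from rest with offset k+1
      have ihk := ih (k + 1) (by omega)
      simp only [fbsLoop, Bool.false_and, if_false, hc, Bool.or_false, fbsFirstIdx, ihk,
        List.reverse_cons, happ, hrev]
      by_cases hF : rest.any (fun d => String.mk [d] == f) = true
      · simp only [hF, if_true]
        congr 2
        simp only [List.length_cons]; push_cast; ring_nf
      · have hJ' : fbsLastIdx f rest.reverse (k + 1 + (rest.length : Int) - 1) = -1 :=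
          fbsLastIdx_neg f rest.reverse _ (by simp [hrev, hF])
        simp only [hF, if_false, hJ', fbsLastIdx]
        rcases fbsFirstIdx_lb sec rest (k + 1) with hi | hi
        · simp [hi]
        · have hne : fbsFirstIdx sec rest (k + 1) ≠ -1 := by omega
          by_cases hcf : (String.mk [c] == f) = true
          · simp [hcf, hne, show ¬ ((-1 : Int) > fbsFirstIdx sec rest (k + 1)) by omega]
            omega
          · simp [hcf, hne, show ¬ ((-1 : Int) > fbsFirstIdx sec rest (k + 1)) by omega]

-- ===== VERDICT (by name: the statement is the Claim_ definition above) =====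
theorem first_before_second_spec : Claim_equal_first_before_second := by
  intro s f sec _
  unfold Spec_first_before_second first_before_second first_before_second_alt
  simpa using fbs_main f sec s.toList 0 le_rfl
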